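-- pv_equiv track=rewrite | github.com/Brenoch/prog | AC7/AC7.py | nao_multiplos_de_13
-- ===== SOURCE A (Python) =====
-- def nao_multiplos_de_13 (x, y):
--     soma = 0
--     if x > y:
--         x, y = y, x
--
--     for num in range(x, y + 1):
--         if num % 13 != 0:
--             soma += num
--     return soma
-- ===== SOURCE B (Python) =====
-- def nao_multiplos_de_13(x, y):
--     lo, hi = (y, x) if x > y else (x, y)
--     total = (lo + hi) * (hi - lo + 1) // 2
--     k1 = -((-lo) // 13)      # ceil(lo/13)
--     k2 = hi // 13            # floor(hi/13)
--     if k1 > k2: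
--         return total
--     return total - 13 * (k1 + k2) * (k2 - k1 + 1) // 2
-- ===== Notes on version B (the rewrite author's own statement) =====
-- stated objective: faster
-- what changed: Replaces the O(y-x) loop with a closed-form arithmetic-series formula: total sum of the interval minus 13 times the sum of the quotient range of its multiples of 13.
import Mathlib
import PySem

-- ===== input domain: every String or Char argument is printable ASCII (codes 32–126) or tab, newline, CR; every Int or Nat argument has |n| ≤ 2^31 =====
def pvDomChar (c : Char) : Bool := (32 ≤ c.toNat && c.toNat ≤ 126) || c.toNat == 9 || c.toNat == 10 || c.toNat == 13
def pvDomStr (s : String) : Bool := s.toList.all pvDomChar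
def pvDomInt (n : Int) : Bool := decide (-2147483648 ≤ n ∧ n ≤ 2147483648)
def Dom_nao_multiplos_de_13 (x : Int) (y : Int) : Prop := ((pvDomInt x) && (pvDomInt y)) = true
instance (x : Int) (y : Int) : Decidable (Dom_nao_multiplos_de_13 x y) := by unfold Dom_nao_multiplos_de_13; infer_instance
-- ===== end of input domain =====

-- B replaces A's O(|y-x|) loop by a closed-form arithmetic-series formula (total sum minus the sum of the multiples of 13); faster (asymptotic).

-- ===== PORT A =====
def nao_multiplos_de_13 (x : Int) (y : Int) : Int :=
  let p := if x > y then (y, x) else (x, y)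
  (PySem.List.pyRange p.1 (p.2 + 1) 1).foldl
    (fun soma num => if PySem.Int.mod num 13 ≠ 0 then soma + num else soma) 0

-- ===== PORT B =====
def nao_multiplos_de_13_alt (x : Int) (y : Int) : Int :=
  let p := if x > y then (y, x) else (x, y)
  let lo := p.1
  let hi := p.2
  let total := PySem.Int.floordiv ((lo + hi) * (hi - lo + 1)) 2
  let k1 := -(PySem.Int.floordiv (-lo) 13)
  let k2 := PySem.Int.floordiv hi 13
  if k1 > k2 then total
  else total - PySem.Int.floordiv (13 * (k1 + k2) * (k2 - k1 + 1)) 2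

-- ===== PRECONDITION & SPEC =====
def Spec_nao_multiplos_de_13 (x : Int) (y : Int) (out : Int) : Prop := out = nao_multiplos_de_13_alt x y
instance (x : Int) (y : Int) (out : Int) : Decidable (Spec_nao_multiplos_de_13 x y out) := by unfold Spec_nao_multiplos_de_13; infer_instance

-- ===== CLAIM (what is proved, stated in full; the proofs are below) =====
def Claim_equal_nao_multiplos_de_13 : Prop := ∀ (x : Int) (y : Int), Dom_nao_multiplos_de_13 x y → Spec_nao_multiplos_de_13 x y (nao_multiplos_de_13 x y)

-- ===== LEMMAS AND PROOFS =====

-- the closed form of B after the swap (lo ≤ hi intended)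
def pvCf (lo hi : Int) : Int :=
  let total := PySem.Int.floordiv ((lo + hi) * (hi - lo + 1)) 2
  let k1 := -(PySem.Int.floordiv (-lo) 13)
  let k2 := PySem.Int.floordiv hi 13
  if k1 > k2 then total
  else total - PySem.Int.floordiv (13 * (k1 + k2) * (k2 - k1 + 1)) 2

lemma pvCf_base (lo : Int) : pvCf lo (lo - 1) = 0 := by
  unfold pvCf
  simp only [PySem.Int.floordiv_eq_ediv_of_pos (show (0:Int) < 2 by norm_num),
      PySem.Int.floordiv_eq_ediv_of_pos (show (0:Int) < 13 by norm_num)]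
  have hcond : -(-lo / 13) > (lo - 1) / 13 := by omega
  simp only [hcond, if_pos]
  have h0 : (lo + (lo - 1)) * (lo - 1 - lo + 1) = 0 := by ring
  rw [h0]
  norm_num

lemma pvCf_step (lo hi : Int) (h : lo ≤ hi) :
    pvCf lo hi = pvCf lo (hi - 1) + (if PySem.Int.mod hi 13 ≠ 0 then hi else 0) := by
  unfold pvCf
  simp only [PySem.Int.mod_eq_emod_of_pos (show (0:Int) < 13 by norm_num),
      PySem.Int.floordiv_eq_ediv_of_pos (show (0:Int) < 2 by norm_num),
      PySem.Int.floordiv_eq_ediv_of_pos (show (0:Int) < 13 by norm_num)]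
  set k1 : Int := -(-lo / 13) with hk1
  -- exactness of the /2 divisions
  obtain ⟨a, ha⟩ : ∃ a, (lo + hi) * (hi - lo + 1) = 2 * a := by
    rcases Int.even_or_odd (lo + hi) with ⟨m, hm⟩ | ⟨m, hm⟩
    · exact ⟨m * (hi - lo + 1), by rw [hm]; ring⟩
    · have h' : hi - lo + 1 = 2 * (hi - m) := by omega
      exact ⟨(lo + hi) * (hi - m), by rw [h']; ring⟩
  obtain ⟨b, hb⟩ : ∃ b, (lo + (hi - 1)) * (hi - 1 - lo + 1) = 2 * b := by
    rcases Int.even_or_odd (lo + (hi - 1)) with ⟨m, hm⟩ | ⟨m, hm⟩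
    · exact ⟨m * (hi - 1 - lo + 1), by rw [hm]; ring⟩
    · have h' : hi - 1 - lo + 1 = 2 * (hi - 1 - m) := by omega
      exact ⟨(lo + (hi - 1)) * (hi - 1 - m), by rw [h']; ring⟩
  have hab : a - b = hi := by
    have : 2 * a - 2 * b = 2 * hi := by rw [← ha, ← hb]; ring
    omega
  rw [ha, hb]
  have ha2 : 2 * a / 2 = a := by omega
  have hb2 : 2 * b / 2 = b := by omega
  rw [ha2, hb2]
  by_cases hm : hi % 13 = 0
  · -- hi is a multiple of 13: quotient k2 steps up, the conditional adds nothing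
    simp only [hm, ne_eq, not_true_eq_false, if_false]
    have hk2 : hi / 13 = (hi - 1) / 13 + 1 := by omega
    have hle : k1 ≤ hi / 13 := by rw [hk1]; omega
    rw [hk2] at hle ⊢
    set k2 : Int := (hi - 1) / 13 with hk2'
    have hcond1 : ¬ (k1 > k2 + 1) := by omega
    simp only [hcond1, if_false]
    have hhi : hi = 13 * (k2 + 1) := by rw [hk2']; omega
    by_cases hc2 : k1 > k2
    · -- first multiple of 13 in the interval: k1 = k2 + 1
      have hk1eq : k1 = k2 + 1 := by omega
      simp only [hc2, if_pos]
      have h1 : 13 * (k1 + (k2 + 1)) * (k2 + 1 - k1 + 1) = 2 * (13 * (k2 + 1)) := by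
        rw [hk1eq]; ring
      rw [h1]
      have : 2 * (13 * (k2 + 1)) / 2 = 13 * (k2 + 1) := by omega
      omega
    · simp only [hc2, if_false]
      obtain ⟨c, hc⟩ : ∃ c, 13 * (k1 + k2) * (k2 - k1 + 1) = 2 * c := by
        rcases Int.even_or_odd (k1 + k2) with ⟨m, hm'⟩ | ⟨m, hm'⟩
        · exact ⟨13 * m * (k2 - k1 + 1), by rw [hm']; ring⟩
        · have h' : k2 - k1 + 1 = 2 * (k2 - m) := by omega
          exact ⟨13 * (k1 + k2) * (k2 - m), by rw [h']; ring⟩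
      obtain ⟨d, hd⟩ : ∃ d, 13 * (k1 + (k2 + 1)) * (k2 + 1 - k1 + 1) = 2 * d := by
        rcases Int.even_or_odd (k1 + (k2 + 1)) with ⟨m, hm'⟩ | ⟨m, hm'⟩
        · exact ⟨13 * m * (k2 + 1 - k1 + 1), by rw [hm']; ring⟩
        · have h' : k2 + 1 - k1 + 1 = 2 * (k2 + 1 - m) := by omega
          exact ⟨13 * (k1 + (k2 + 1)) * (k2 + 1 - m), by rw [h']; ring⟩
      have hdc : d - c = 13 * (k2 + 1) := by
        have : 2 * d - 2 * c = 2 * (13 * (k2 + 1)) := by rw [← hc, ← hd]; ring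
        omega
      rw [hc, hd]
      have h1 : 2 * c / 2 = c := by omega
      have h2 : 2 * d / 2 = d := by omega
      omega
  · -- hi not a multiple of 13: quotient k2 unchanged, the conditional adds hi
    simp only [hm, ne_eq, not_false_eq_true, if_true]
    have hk2 : hi / 13 = (hi - 1) / 13 := by omega
    rw [hk2]
    by_cases hc : k1 > (hi - 1) / 13 <;> simp only [hc, if_pos, if_false] <;> omega

-- A's loop over [lo, hi] equals the closed form, for lo - 1 ≤ hi
lemma pvLoop_eq (n : Nat) : ∀ lo hi : Int, lo - 1 ≤ hi → (hi + 1 - lo).toNat = n →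
    (PySem.List.pyRange lo (hi + 1) 1).foldl
      (fun soma num => if PySem.Int.mod num 13 ≠ 0 then soma + num else soma) 0 = pvCf lo hi := by
  induction n with
  | zero =>
    intro lo hi hle hn
    have hhi : hi = lo - 1 := by omega
    subst hhi
    rw [PySem.List.pyRange_one_eq_nil (by omega)]
    simp [pvCf_base]
  | succ n ih =>
    intro lo hi hle hn
    have hlo : lo ≤ hi := by omega
    rw [PySem.List.pyRange_one_succ_right hlo, List.foldl_append]
    have h1 : hi = (hi - 1) + 1 := by omega
    rw [h1] at hlo ⊢
    rw [ih lo (hi - 1) (by omega) (by omega)]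
    rw [pvCf_step lo ((hi - 1) + 1) (by omega)]
    simp only [List.foldl]
    split <;> simp

lemma pvAlt_eq_cf (x y : Int) :
    nao_multiplos_de_13_alt x y = if x > y then pvCf y x else pvCf x y := by
  unfold nao_multiplos_de_13_alt pvCf
  split <;> simp

-- ===== VERDICT (by name: the statement is the Claim_ definition above) =====
theorem nao_multiplos_de_13_spec : Claim_equal_nao_multiplos_de_13 := by
  intro x y _
  unfold Spec_nao_multiplos_de_13
  rw [pvAlt_eq_cf]
  unfold nao_multiplos_de_13
  by_cases h : x > y
  · simp only [h, if_pos]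
    exact pvLoop_eq (x + 1 - y).toNat y x (by omega) rfl
  · simp only [h, if_false]
    exact pvLoop_eq (y + 1 - x).toNat x y (by omega) rfl
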